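-- pv_equiv track=rewrite | github.com/alishalopes87/hb-coding-challenges | anagramofpalindrome.py | is_anagram_of_palindrome
-- ===== SOURCE A (Python) =====
-- def is_anagram_of_palindrome(word):
--     """Is the word an anagram of a palindrome?"""
--
--     #if letter in the word has a partner it is
--     #if one extra that's ok
--     #iterate over the word
--     #see if i in the rest of the word continue
--     # if it is not in rest of word increase count
--     #if count is > 1 return false
--
--     count = {}
--     if len(word) == 2 and word[0] != word[1]:
--         return False
--
--     for char in word:
--         if char in count:
--             count[char] += 1
--         else:
--             count[char] = 1
--
--     odd = 0
--     for char in count: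
--         if count[char] % 2 != 0:
--             odd += 1
--         if odd > 1:
--             return False
--
--
--     return True
-- ===== SOURCE B (Python) =====
-- def is_anagram_of_palindrome(word):
--     """Is the word an anagram of a palindrome?"""
--     # one pass: set of characters seen an odd number of times so far
--     odd = set()
--     for char in word:
--         if char in odd:
--             odd.remove(char)
--         else:
--             odd.add(char)
--     return len(odd) <= 1
-- ===== Notes on version B (the rewrite author's own statement) =====
-- stated objective: idiomatic
-- what changed: Replaces the count-dict-then-scan-for-odd-frequencies two-pass approach (with a redundant length-2 guard) by a single pass maintaining a parity set whose membership is toggled per character, deciding by the set's final size.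
import Mathlib
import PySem

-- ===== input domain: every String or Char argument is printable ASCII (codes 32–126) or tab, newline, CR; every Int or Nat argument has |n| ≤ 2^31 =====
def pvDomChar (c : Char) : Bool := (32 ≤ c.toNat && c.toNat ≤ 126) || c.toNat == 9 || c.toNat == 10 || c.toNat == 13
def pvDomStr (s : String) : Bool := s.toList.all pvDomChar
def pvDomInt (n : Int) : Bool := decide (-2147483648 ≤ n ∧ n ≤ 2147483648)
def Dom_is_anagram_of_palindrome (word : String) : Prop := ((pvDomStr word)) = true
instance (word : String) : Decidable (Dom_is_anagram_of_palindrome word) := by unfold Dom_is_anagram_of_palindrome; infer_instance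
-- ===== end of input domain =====

-- B replaces A's count-dict + odd-frequency rescan (and its redundant length-2 guard)
-- by a single pass toggling a parity set; same results, more idiomatic.


-- ===== PORT A =====
-- A's second loop ('for char in count: … return False … / return True'), with its early return.
-- 'count[char]' is ported as getD with default 0: exact here, since the loop runs over count's own keys.
def pvOddLoopA (count : PySem.Dict Char Int) : List Char → Int → Bool
  | [], _ => true
  | c :: rest, odd =>
    let odd' := if PySem.Int.mod (count.getD c 0) 2 ≠ 0 then odd + 1 else odd
    if odd' > 1 then false else pvOddLoopA count rest odd'

def is_anagram_of_palindrome (word : String) : Bool :=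
  if PySem.Str.len word = 2 ∧ PySem.Str.pyGet? word 0 ≠ PySem.Str.pyGet? word 1 then
    false
  else
    let count := word.toList.foldl
      (fun d c => if d.contains c then d.modify c 0 (· + 1) else d.insert c 1)
      PySem.Dict.empty
    pvOddLoopA count count.keys 0

-- ===== PORT B =====
-- the body of B's loop: 'odd.remove(char)' is ported as Set.discard, exact here since it runs
-- only under 'char in odd'.
def pvToggleStep (s : PySem.Set Char) (c : Char) : PySem.Set Char :=
  if PySem.Set.contains s c then PySem.Set.discard s c else PySem.Set.add s c

def is_anagram_of_palindrome_alt (word : String) : Bool :=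
  let odd : PySem.Set Char := word.toList.foldl pvToggleStep PySem.Set.empty
  decide (PySem.Set.len odd ≤ 1)

-- ===== PRECONDITION & SPEC =====
def Spec_is_anagram_of_palindrome (word : String) (out : Bool) : Prop := out = is_anagram_of_palindrome_alt word
instance (word : String) (out : Bool) : Decidable (Spec_is_anagram_of_palindrome word out) := by unfold Spec_is_anagram_of_palindrome; infer_instance

-- ===== CLAIM (what is proved, stated in full; the proofs are below) =====
def Claim_equal_is_anagram_of_palindrome : Prop := ∀ (word : String), Dom_is_anagram_of_palindrome word → Spec_is_anagram_of_palindrome word (is_anagram_of_palindrome word)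

-- ===== LEMMAS AND PROOFS =====

-- B's toggle loop: the result is duplicate-free and holds exactly the characters whose
-- running count has the opposite parity of their membership in the start set.
theorem pvToggle_invariant (l : List Char) (s : PySem.Set Char) (hnd : s.Nodup) :
    (l.foldl pvToggleStep s).Nodup ∧
    ∀ c, c ∈ l.foldl pvToggleStep s ↔
      ((c ∈ s ∧ l.count c % 2 = 0) ∨ (c ∉ s ∧ l.count c % 2 = 1)) := by
  induction l generalizing s with
  | nil =>
    refine ⟨hnd, fun c => ?_⟩
    simp only [List.foldl_nil, List.count_nil]
    by_cases hs : c ∈ s <;> simp [hs]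
  | cons a l ih =>
    have hstep : (pvToggleStep s a).Nodup := by
      unfold pvToggleStep
      split
      · exact PySem.Set.nodup_discard s a hnd
      · exact PySem.Set.nodup_add s a hnd
    obtain ⟨h1, h2⟩ := ih (pvToggleStep s a) hstep
    refine ⟨h1, fun c => ?_⟩
    rw [List.foldl_cons, h2 c]
    have hmem : c ∈ pvToggleStep s a ↔ ((c ∈ s ∧ c ≠ a) ∨ (c ∉ s ∧ c = a)) := by
      unfold pvToggleStep
      by_cases ha : a ∈ s
      · rw [if_pos (by simpa [PySem.Set.contains_eq_listContains] using ha), PySem.Set.mem_discard]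
        by_cases hc : c = a <;> subst_eqs <;> tauto
      · rw [if_neg (by simpa [PySem.Set.contains_eq_listContains] using ha), PySem.Set.mem_add]
        by_cases hc : c = a <;> subst_eqs <;> tauto
    rw [hmem]
    by_cases hc : c = a
    · subst hc
      rw [List.count_cons_self]
      by_cases hs : c ∈ s <;>
        simp only [hs, ne_eq, not_true_eq_false, not_false_eq_true, true_and, false_and,
          and_true, and_false, or_false, false_or, and_self] <;> omega
    · rw [List.count_cons_of_ne (Ne.symm hc)]
      by_cases hs : c ∈ s <;>
        simp [hs, hc]

-- A's counting loop body is exactly the Counter step (inserting 1 for a fresh key IS modify with default 0).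
theorem pvStepA_eq :
    (fun (d : PySem.Dict Char Int) (c : Char) =>
      if d.contains c then d.modify c 0 (· + 1) else d.insert c 1) =
    (fun (d : PySem.Dict Char Int) (c : Char) => d.modify c 0 (· + 1)) := by
  funext d c
  by_cases h : d.contains c
  · simp [h]
  · have h' : d.contains c = false := by simpa using h
    simp [h, PySem.Dict.modify, PySem.Dict.getD_of_not_contains d 0 h']

-- A's odd-scanning loop with early return computes 'acc + number of odd-count keys ≤ 1'.
theorem pvOddLoopA_eq (d : PySem.Dict Char Int) (ks : List Char) (odd : Int)
    (h0 : 0 ≤ odd) (h1 : odd ≤ 1) :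
    pvOddLoopA d ks odd =
      decide (odd + (ks.countP (fun c => decide (PySem.Int.mod (d.getD c 0) 2 ≠ 0)) : Int) ≤ 1) := by
  induction ks generalizing odd with
  | nil => simp [pvOddLoopA, h1]
  | cons c rest ih =>
    rw [pvOddLoopA, List.countP_cons]
    by_cases hp : PySem.Int.mod (d.getD c 0) 2 ≠ 0
    · have e1 : (if PySem.Int.mod (d.getD c 0) 2 ≠ 0 then odd + 1 else odd) = odd + 1 :=
        if_pos hp
      have e2 : (if decide (PySem.Int.mod (d.getD c 0) 2 ≠ 0) = true then 1 else 0) = 1 := by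
        simp only [decide_eq_true_eq]; exact if_pos hp
      rw [e1, e2]
      by_cases hgt : odd + 1 > 1
      · rw [if_pos hgt, eq_comm, decide_eq_false_iff_not]
        push_cast
        omega
      · rw [if_neg hgt, ih (odd + 1) (by omega) (by omega), decide_eq_decide]
        push_cast
        omega
    · have hp' : PySem.Int.mod (d.getD c 0) 2 = 0 := not_not.mp hp
      have e1 : (if PySem.Int.mod (d.getD c 0) 2 ≠ 0 then odd + 1 else odd) = odd :=
        if_neg hp
      have e2 : (if decide (PySem.Int.mod (d.getD c 0) 2 ≠ 0) = true then 1 else 0) = 0 := by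
        simp only [decide_eq_true_eq]; exact if_neg hp
      rw [e1, e2, if_neg (show ¬ odd > 1 by omega), ih odd h0 h1, decide_eq_decide]
      push_cast
      omega


theorem is_anagram_of_palindrome_spec : Claim_equal_is_anagram_of_palindrome := by
  intro word _
  unfold Spec_is_anagram_of_palindrome is_anagram_of_palindrome is_anagram_of_palindrome_alt
  obtain ⟨hndB, hmemB⟩ := pvToggle_invariant word.toList PySem.Set.empty List.nodup_nil
  split
  case isTrue h =>
    -- guard case: word has exactly two distinct characters; B's set ends with both of them
    obtain ⟨hlen, hne⟩ := h
    rw [PySem.Str.len_eq] at hlen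
    have h2 : word.toList.length = 2 := by exact_mod_cast hlen
    obtain ⟨a, b, hab⟩ := List.length_eq_two.mp h2
    have hga : PySem.Str.pyGet? word 0 = some a := by
      simp [PySem.Str.pyGet?, hab, PySem.List.pyGet?, PySem.List.pyIdx?]
    have hgb : PySem.Str.pyGet? word 1 = some b := by
      simp [PySem.Str.pyGet?, hab, PySem.List.pyGet?, PySem.List.pyIdx?]
    have hne' : a ≠ b := by
      intro hEq; exact hne (by rw [hga, hgb, hEq])
    rw [hab] at hmemB ⊢
    have : (PySem.Set.len ([a, b].foldl pvToggleStep PySem.Set.empty)) = 2 := by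
      simp [pvToggleStep, PySem.Set.contains_eq_listContains, PySem.Set.add,
        PySem.Set.len, PySem.Set.empty, Ne.symm hne']
    rw [eq_comm, decide_eq_false_iff_not, this]
    omega
  case isFalse =>
    rw [pvStepA_eq, ← PySem.Dict.counter_eq_foldl,
      pvOddLoopA_eq _ _ 0 le_rfl (by omega), PySem.Dict.keys_counter]
    congr 1
    rw [zero_add]
    have hlen :
        ((PySem.Set.ofList word.toList).countP
          (fun c => decide (PySem.Int.mod ((PySem.Dict.counter word.toList).getD c 0) 2 ≠ 0)) : Int) =
        PySem.Set.len (word.toList.foldl pvToggleStep PySem.Set.empty) := by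
      rw [List.countP_eq_length_filter, PySem.Set.len]
      congr 1
      have hperm :
          ((PySem.Set.ofList word.toList).filter
            (fun c => decide (PySem.Int.mod ((PySem.Dict.counter word.toList).getD c 0) 2 ≠ 0))).Perm
          (word.toList.foldl pvToggleStep PySem.Set.empty) := by
        rw [List.perm_ext_iff_of_nodup
          ((PySem.Set.nodup_ofList word.toList).filter _) hndB]
        intro c
        rw [List.mem_filter, PySem.Set.mem_ofList, hmemB c]
        have hpred :
            (decide (PySem.Int.mod ((PySem.Dict.counter word.toList).getD c 0) 2 ≠ 0) = true)
              ↔ word.toList.count c % 2 = 1 := by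
          rw [PySem.Dict.getD_counter,
            show (2 : Int) = ((2 : Nat) : Int) from rfl, PySem.Int.mod_natCast]
          simp only [ne_eq, decide_eq_true_eq, Nat.cast_eq_zero]
          omega
        rw [hpred]
        have hin : word.toList.count c % 2 = 1 → c ∈ word.toList := fun h =>
          List.count_pos_iff.mp (by omega)
        have hemp : c ∉ (PySem.Set.empty : PySem.Set Char) := by
          simp [PySem.Set.empty]
        tauto
      exact hperm.length_eq
    rw [hlen]
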